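-- pv_equiv track=rewrite | github.com/LeZelote01/test | ai-engine/threat_detection/quantum_anomaly.py | _detect_repeated_sequences
-- ===== SOURCE A (Python) =====
-- def _detect_repeated_sequences(text: str) -> int:
--     """Detect repeated sequences in text."""
--     if len(text) < 10:
--         return 0
--
--     repeated_count = 0
--     for i in range(len(text) - 5):
--         sequence = text[i:i+5]
--         if text.count(sequence) > 1:
--             repeated_count += 1
--
--     return repeated_count
-- ===== SOURCE B (Python) =====
-- def _detect_repeated_sequences(text: str) -> int:
--     """Detect repeated sequences in text (hash 5-gram spans, one pass)."""
--     if len(text) < 10: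
--         return 0
--
--     n = len(text)
--     span = {}
--     for j in range(n - 4):
--         g = text[j:j+5]
--         if g in span:
--             span[g] = (span[g][0], j)
--         else:
--             span[g] = (j, j)
--
--     repeated_count = 0
--     for i in range(n - 5):
--         first, last = span[text[i:i+5]]
--         if last - first >= 5:
--             repeated_count += 1
--     return repeated_count
-- ===== Notes on version B (the rewrite author's own statement) =====
-- stated objective: faster
-- what changed: Instead of calling text.count on every 5-gram (a full scan per position), B builds in one pass a dict mapping each 5-gram to its (first, last) occurrence positions and counts positions whose gram's span is at least 5 (i.e. a second non-overlapping occurrence exists).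
import Mathlib
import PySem

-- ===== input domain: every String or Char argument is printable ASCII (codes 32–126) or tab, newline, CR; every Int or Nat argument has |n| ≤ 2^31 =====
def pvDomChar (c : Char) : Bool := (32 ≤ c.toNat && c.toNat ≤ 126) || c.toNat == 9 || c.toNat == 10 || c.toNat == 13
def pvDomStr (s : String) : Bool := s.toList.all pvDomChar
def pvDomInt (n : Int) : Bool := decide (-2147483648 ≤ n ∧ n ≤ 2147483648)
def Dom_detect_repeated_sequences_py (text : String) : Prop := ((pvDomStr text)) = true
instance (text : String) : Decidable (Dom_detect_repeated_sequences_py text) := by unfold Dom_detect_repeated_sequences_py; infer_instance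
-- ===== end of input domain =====

-- ===== PORT A =====
-- B replaces A's per-position text.count scan (quadratic) by one dict of 5-gram
-- first/last occurrence positions built in a single pass; objective: faster.
def detect_repeated_sequences_py (text : String) : Int :=
  if PySem.Str.len text < 10 then 0
  else
    (PySem.List.pyRange 0 (PySem.Str.len text - 5)).foldl
      (fun repeated_count i =>
        let sequence := PySem.Str.slice text (some i) (some (i + 5))
        if 1 < PySem.Str.count text sequence then repeated_count + 1 else repeated_count) 0

-- ===== PORT B =====
-- one step of B's first pass: record/update the (first, last) occurrence span of the 5-gram at j
def pvStep (text : String) (d : PySem.Dict String (Int × Int)) (j : Int) :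
    PySem.Dict String (Int × Int) :=
  let g := PySem.Str.slice text (some j) (some (j + 5))
  match d.get? g with
  | some p => d.insert g (p.1, j)
  | none   => d.insert g (j, j)

def detect_repeated_sequences_py_alt (text : String) : Int :=
  if PySem.Str.len text < 10 then 0
  else
    let n := PySem.Str.len text
    let span := (PySem.List.pyRange 0 (n - 4)).foldl (pvStep text) PySem.Dict.empty
    (PySem.List.pyRange 0 (n - 5)).foldl
      (fun repeated_count i =>
        let fl := span.getD (PySem.Str.slice text (some i) (some (i + 5))) (0, 0)
        if 5 ≤ fl.2 - fl.1 then repeated_count + 1 else repeated_count) 0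

-- ===== PRECONDITION & SPEC =====
def Spec_detect_repeated_sequences_py (text : String) (out : Int) : Prop := out = detect_repeated_sequences_py_alt text
instance (text : String) (out : Int) : Decidable (Spec_detect_repeated_sequences_py text out) := by unfold Spec_detect_repeated_sequences_py; infer_instance

-- ===== CLAIM (what is proved, stated in full; the proofs are below) =====
def Claim_equal_detect_repeated_sequences_py : Prop := ∀ (text : String), Dom_detect_repeated_sequences_py text → Spec_detect_repeated_sequences_py text (detect_repeated_sequences_py text)

-- ===== LEMMAS AND PROOFS =====

-- A-side: Python's greedy non-overlapping substring count (PySem.Chars.count.go) never shrinks its accumulator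
theorem pv_go_le (sub : List Char) : ∀ (fuel : Nat) (l : List Char) (acc : Nat),
    acc ≤ PySem.Chars.count.go sub fuel l acc := by
  intro fuel
  induction fuel with
  | zero => intro l acc; simp [PySem.Chars.count.go]
  | succ n ih =>
    intro l acc
    cases l with
    | nil => simp [PySem.Chars.count.go]
    | cons h t =>
      rw [PySem.Chars.count.go]
      split
      · exact le_trans (Nat.le_succ acc) (ih _ _)
      · exact ih _ _

-- the greedy scan finds at least one occurrence iff sub occurs somewhere
theorem pv_go_one_iff (sub : List Char) (hsub : sub ≠ []) :
    ∀ (fuel : Nat) (l : List Char) (acc : Nat), l.length ≤ fuel →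
      (acc + 1 ≤ PySem.Chars.count.go sub fuel l acc ↔ ∃ k, sub <+: l.drop k) := by
  intro fuel
  induction fuel with
  | zero =>
    intro l acc hl
    have : l = [] := List.eq_nil_of_length_eq_zero (Nat.le_zero.mp hl)
    subst this
    simp [PySem.Chars.count.go, List.drop_nil]
    exact fun h => hsub h
  | succ n ih =>
    intro l acc hl
    cases l with
    | nil =>
      simp [PySem.Chars.count.go]
      exact fun h => hsub h
    | cons h t =>
      rw [PySem.Chars.count.go]
      split
      case isTrue hpre =>
        constructor
        · intro _; exact ⟨0, by simpa using List.isPrefixOf_iff_prefix.mp hpre⟩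
        · intro _; exact pv_go_le _ _ _ _
      case isFalse hpre =>
        have hlt : t.length ≤ n := by simpa using hl
        rw [ih t acc hlt]
        constructor
        · rintro ⟨k, hk⟩; exact ⟨k + 1, by simpa using hk⟩
        · rintro ⟨k, hk⟩
          cases k with
          | zero =>
            exfalso; exact hpre (List.isPrefixOf_iff_prefix.mpr (by simpa using hk))
          | succ k' => exact ⟨k', by simpa using hk⟩

-- the greedy scan counts ≥ 2 iff sub occurs at two positions at least sub.length apart
theorem pv_go_two_iff (sub : List Char) (hsub : sub ≠ []) :
    ∀ (fuel : Nat) (l : List Char) (acc : Nat), l.length ≤ fuel →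
      (acc + 2 ≤ PySem.Chars.count.go sub fuel l acc ↔
        ∃ p q : Nat, p + sub.length ≤ q ∧ sub <+: l.drop p ∧ sub <+: l.drop q) := by
  intro fuel
  induction fuel with
  | zero =>
    intro l acc hl
    have : l = [] := List.eq_nil_of_length_eq_zero (Nat.le_zero.mp hl)
    subst this
    simp [PySem.Chars.count.go, List.drop_nil]
    exact fun p q _ h => hsub h
  | succ n ih =>
    intro l acc hl
    cases l with
    | nil =>
      simp [PySem.Chars.count.go]
      exact fun p q _ h => hsub h
    | cons h t =>
      rw [PySem.Chars.count.go]
      split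
      case isTrue hpre =>
        have hpre' : sub <+: (h :: t) := List.isPrefixOf_iff_prefix.mp hpre
        have hlen : ((h :: t).drop sub.length).length ≤ n := by
          have : 1 ≤ sub.length := List.length_pos_of_ne_nil hsub
          simp only [List.length_drop, List.length_cons]
          simp only [List.length_cons] at hl
          omega
        have h1 := pv_go_one_iff sub hsub n ((h :: t).drop sub.length) (acc + 1) hlen
        constructor
        · intro hgo
          obtain ⟨k, hk⟩ := h1.mp (by omega)
          refine ⟨0, sub.length + k, by omega, by simpa using hpre', ?_⟩
          rwa [List.drop_drop] at hk
        · rintro ⟨p, q, hpq, hp, hq⟩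
          have : acc + 1 + 1 ≤ PySem.Chars.count.go sub n ((h :: t).drop sub.length) (acc + 1) := by
            apply h1.mpr
            refine ⟨q - sub.length, ?_⟩
            rw [List.drop_drop]
            have he : sub.length + (q - sub.length) = q := by omega
            rwa [he]
          omega
      case isFalse hpre =>
        have hlt : t.length ≤ n := by simpa using hl
        rw [ih t acc hlt]
        have hsl : 1 ≤ sub.length := List.length_pos_of_ne_nil hsub
        constructor
        · rintro ⟨p, q, hpq, hp, hq⟩
          exact ⟨p + 1, q + 1, by omega, by simpa using hp, by simpa using hq⟩
        · rintro ⟨p, q, hpq, hp, hq⟩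
          cases p with
          | zero =>
            exfalso; exact hpre (List.isPrefixOf_iff_prefix.mpr (by simpa using hp))
          | succ p' =>
            cases q with
            | zero => omega
            | succ q' => exact ⟨p', q', by omega, by simpa using hp, by simpa using hq⟩

-- s.count(sub) > 1 characterised by two occurrences ≥ len(sub) apart
theorem pv_count_two_iff (l sub : List Char) (hsub : sub ≠ []) :
    2 ≤ PySem.Chars.count l sub ↔
      ∃ p q : Nat, p + sub.length ≤ q ∧ sub <+: l.drop p ∧ sub <+: l.drop q := by
  rw [PySem.Chars.count]
  simp [List.isEmpty_iff, hsub]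
  exact pv_go_two_iff sub hsub l.length l 0 le_rfl

-- B-side: the span dict built by the first pass, characterised by the filtered occurrence list
theorem pv_span_get? (text : String) : ∀ (l : List Int) (d : PySem.Dict String (Int × Int)) (g : String),
    ((l.foldl (pvStep text) d).get? g) =
      match l.filter (fun j => PySem.Str.slice text (some j) (some (j + 5)) == g) with
      | [] => d.get? g
      | j :: rest => some (((d.get? g).map Prod.fst).getD j, rest.getLastD j) := by
  intro l
  induction l with
  | nil => intro d g; simp
  | cons j t ih =>
    intro d g
    simp only [List.foldl_cons, List.filter_cons]
    by_cases hj : PySem.Str.slice text (some j) (some (j + 5)) = g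
    · simp only [hj, beq_self_eq_true, if_pos]
      rw [ih]
      have hstep : (pvStep text d j).get? g = some (((d.get? g).map Prod.fst).getD j, j) := by
        rw [pvStep, hj]
        cases hd : d.get? g with
        | none => simp [PySem.Dict.get?_insert_self]
        | some p => simp [PySem.Dict.get?_insert_self]
      rw [hstep]
      cases ht : t.filter (fun j' => PySem.Str.slice text (some j') (some (j' + 5)) == g) with
      | nil => simp
      | cons k rest =>
        simp only [Option.map_some, Option.getD_some]
        rw [List.getLastD_cons]
    · have hne : (PySem.Str.slice text (some j) (some (j + 5)) == g) = false := by
        simpa using hj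
      simp only [hne, if_neg, Bool.false_eq_true, not_false_iff]
      rw [ih]
      have hstep : (pvStep text d j).get? g = d.get? g := by
        rw [pvStep]
        cases hd : d.get? (PySem.Str.slice text (some j) (some (j + 5))) with
        | none => exact PySem.Dict.get?_insert_of_ne _ _ (Ne.symm hj)
        | some p => exact PySem.Dict.get?_insert_of_ne _ _ (Ne.symm hj)
      rw [hstep]

-- bounds of a strictly sorted nonempty list: head is a lower bound, getLastD a member and upper bound
theorem pv_sorted_head_le {j : Int} {rest : List Int} (hs : (j :: rest).Pairwise (· < ·)) :
    ∀ x ∈ j :: rest, j ≤ x := by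
  intro x hx
  rcases List.mem_cons.mp hx with h | h
  · exact le_of_eq h.symm
  · exact le_of_lt ((List.pairwise_cons.mp hs).1 x h)

theorem pv_le_getLastD : ∀ (rest : List Int) (j : Int), (j :: rest).Pairwise (· < ·) →
    ∀ x ∈ j :: rest, x ≤ rest.getLastD j := by
  intro rest
  induction rest with
  | nil =>
    intro j _ x hx
    have : x = j := by simpa using hx
    simp [this]
  | cons k rest' ih =>
    intro j hs x hx
    rw [List.getLastD_cons]
    rcases List.mem_cons.mp hx with h | h
    · subst h
      have h1 : x ≤ k := le_of_lt ((List.pairwise_cons.mp hs).1 k (by simp))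
      have h2 : k ≤ rest'.getLastD k :=
        ih k (List.pairwise_cons.mp hs).2 k (by simp)
      omega
    · exact ih k (List.pairwise_cons.mp hs).2 x h

theorem pv_getLastD_mem : ∀ (rest : List Int) (j : Int), rest.getLastD j ∈ j :: rest := by
  intro rest
  induction rest with
  | nil => intro j; simp
  | cons k rest' ih =>
    intro j
    rw [List.getLastD_cons]
    exact List.mem_cons_of_mem j (ih k)

-- slicing text[j:j+5] at a nonnegative index, on the character list
theorem pv_slice_toList (text : String) (j : Int) (hj0 : 0 ≤ j) :
    (PySem.Str.slice text (some j) (some (j + 5))).toList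
      = (text.toList.drop j.toNat).take 5 := by
  have hjnat : j = (j.toNat : Int) := (Int.toNat_of_nonneg hj0).symm
  rw [PySem.Str.toList_slice, PySem.Chars.slice_eq_listSlice, hjnat]
  have h5 : ((j.toNat : Int) + 5) = ((j.toNat + 5 : Nat) : Int) := by push_cast; ring
  rw [h5, PySem.List.slice_natCast]
  congr 1
  omega

-- a position j holds the 5-gram g iff g is a prefix of the drop at j (both pass ranges see the same occurrences)
theorem pv_occ_iff (text g : String) (hg : g.toList.length = 5) (j : Int)
    (_hN : 10 ≤ text.toList.length) :
    (j ∈ PySem.List.pyRange 0 ((text.toList.length : Int) - 4) ∧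
      PySem.Str.slice text (some j) (some (j + 5)) = g) ↔
    (0 ≤ j ∧ g.toList <+: text.toList.drop j.toNat) := by
  constructor
  · rintro ⟨hmem, heq⟩
    obtain ⟨hj0, hjlt⟩ := PySem.List.mem_pyRange_one.mp hmem
    refine ⟨hj0, ?_⟩
    rw [List.prefix_iff_eq_take, hg, ← heq, pv_slice_toList text j hj0]
  · rintro ⟨hj0, hpre⟩
    have hjnat : j = (j.toNat : Int) := (Int.toNat_of_nonneg hj0).symm
    have hlen5 : j.toNat + 5 ≤ text.toList.length := by
      have h1 := hpre.length_le
      rw [hg, List.length_drop] at h1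
      omega
    have heq : PySem.Str.slice text (some j) (some (j + 5)) = g := by
      apply String.toList_inj.mp
      rw [pv_slice_toList text j hj0]
      have h2 := List.prefix_iff_eq_take.mp hpre
      rw [hg] at h2
      exact h2.symm
    exact ⟨PySem.List.mem_pyRange_one.mpr ⟨hj0, by omega⟩, heq⟩

-- the pyRange position list is strictly increasing, hence so is any filtered occurrence list
theorem pv_occ_sorted (text g : String) (hN : 10 ≤ text.toList.length) :
    ((PySem.List.pyRange 0 ((text.toList.length : Int) - 4)).filter
      (fun j => PySem.Str.slice text (some j) (some (j + 5)) == g)).Pairwise (· < ·) := by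
  apply List.Pairwise.sublist (List.filter_sublist)
  have hc : ((text.toList.length : Int) - 4) = ((text.toList.length - 4 : Nat) : Int) := by omega
  rw [hc, PySem.List.pyRange_zero_natCast]
  apply List.Pairwise.map (R := (· < · : Nat → Nat → Prop))
  · intro a b h; exact_mod_cast h
  · exact List.pairwise_lt_range

-- the central fact: A's "this 5-gram repeats" test agrees with B's span test at every counted position
theorem pv_cond_iff (text : String) (i : Int)
    (hN : 10 ≤ text.toList.length)
    (hi0 : 0 ≤ i) (hiN : i < (text.toList.length : Int) - 5) :
    (1 < PySem.Str.count text (PySem.Str.slice text (some i) (some (i + 5)))) ↔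
    (5 ≤ (((PySem.List.pyRange 0 ((text.toList.length : Int) - 4)).foldl (pvStep text) PySem.Dict.empty).getD (PySem.Str.slice text (some i) (some (i + 5))) (0, 0)).2 -
      (((PySem.List.pyRange 0 ((text.toList.length : Int) - 4)).foldl (pvStep text) PySem.Dict.empty).getD (PySem.Str.slice text (some i) (some (i + 5))) (0, 0)).1) := by
  set g := PySem.Str.slice text (some i) (some (i + 5)) with hgdef
  have hitn : i = (i.toNat : Int) := (Int.toNat_of_nonneg hi0).symm
  have hg5 : g.toList.length = 5 := by
    rw [hgdef, pv_slice_toList text i hi0]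
    rw [List.length_take, List.length_drop]
    omega
  have hgne : g.toList ≠ [] := by
    intro h; rw [h] at hg5; simp at hg5
  -- i itself is an occurrence of g
  have hiocc : (0 ≤ i ∧ g.toList <+: text.toList.drop i.toNat) := by
    refine ⟨hi0, ?_⟩
    rw [List.prefix_iff_eq_take, hg5, hgdef, pv_slice_toList text i hi0]
  have himem := (pv_occ_iff text g hg5 i hN).mpr hiocc
  -- the occurrence list
  set O := (PySem.List.pyRange 0 ((text.toList.length : Int) - 4)).filter
      (fun j => PySem.Str.slice text (some j) (some (j + 5)) == g) with hOdef
  have hmemO : ∀ j : Int, j ∈ O ↔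
      (0 ≤ j ∧ g.toList <+: text.toList.drop j.toNat) := by
    intro j
    rw [hOdef, List.mem_filter, beq_iff_eq]
    exact pv_occ_iff text g hg5 j hN
  have hiO : i ∈ O := (hmemO i).mpr hiocc
  have hOsorted : O.Pairwise (· < ·) := pv_occ_sorted text g hN
  -- the span lookup
  have hspan := pv_span_get? text (PySem.List.pyRange 0 ((text.toList.length : Int) - 4))
      PySem.Dict.empty g
  have hempty : (PySem.Dict.empty : PySem.Dict String (Int × Int)).get? g = none := by
    simp [pysem]
  rw [hempty, ← hOdef] at hspan
  cases hO : O with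
  | nil => exact absurd hiO (by rw [hO]; simp)
  | cons j0 rest =>
    rw [hO] at hspan
    simp only [Option.map_none, Option.getD_none] at hspan
    have hgetD : (((PySem.List.pyRange 0 ((text.toList.length : Int) - 4)).foldl
        (pvStep text) PySem.Dict.empty).getD g (0, 0)) = (j0, rest.getLastD j0) := by
      have hd : ∀ (d : PySem.Dict String (Int × Int)) (k : String) (v : Int × Int),
          d.getD k v = (d.get? k).getD v := by
        intro d k v; simp only [PySem.Dict.getD]
      rw [hd, hspan]
      rfl
    rw [hgetD]
    set lastv := rest.getLastD j0 with hlast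
    have hj0O : j0 ∈ O := by rw [hO]; simp
    have hlastO : lastv ∈ O := by rw [hO, hlast]; exact pv_getLastD_mem rest j0
    -- A's side via the count characterisation
    rw [PySem.Str.count_eq]
    have hcnt := pv_count_two_iff text.toList g.toList hgne
    rw [hg5] at hcnt
    have h2iff : (1 < PySem.Chars.count text.toList g.toList) ↔
        2 ≤ PySem.Chars.count text.toList g.toList := by omega
    rw [h2iff, hcnt]
    constructor
    · rintro ⟨p, q, hpq, hp, hq⟩
      have hpO : (p : Int) ∈ O := (hmemO p).mpr ⟨Int.natCast_nonneg p, by simpa using hp⟩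
      have hqO : (q : Int) ∈ O := (hmemO q).mpr ⟨Int.natCast_nonneg q, by simpa using hq⟩
      have h1 : j0 ≤ (p : Int) := pv_sorted_head_le (hO ▸ hOsorted) _ (hO ▸ hpO)
      have h2 : (q : Int) ≤ lastv := pv_le_getLastD rest j0 (hO ▸ hOsorted) _ (hO ▸ hqO)
      omega
    · intro hspan5
      have hj0' := (hmemO j0).mp hj0O
      have hlast' := (hmemO lastv).mp hlastO
      refine ⟨j0.toNat, lastv.toNat, ?_, hj0'.2, hlast'.2⟩
      have := hj0'.1
      have := hlast'.1
      omega

-- ===== VERDICT (by name: the statement is the Claim_ definition above) =====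
theorem detect_repeated_sequences_py_spec : Claim_equal_detect_repeated_sequences_py := by
  intro text _
  unfold Spec_detect_repeated_sequences_py detect_repeated_sequences_py detect_repeated_sequences_py_alt
  by_cases hlt : PySem.Str.len text < 10
  · rw [if_pos hlt, if_pos hlt]
  · rw [if_neg hlt, if_neg hlt]
    have hN : 10 ≤ text.toList.length := by
      rw [PySem.Str.len_eq] at hlt; omega
    have hlen : PySem.Str.len text = (text.toList.length : Int) := PySem.Str.len_eq text
    rw [hlen]
    dsimp only
    apply PySem.List.foldl_congr_mem
    intro acc i hi
    obtain ⟨hi0, hiN⟩ := PySem.List.mem_pyRange_one.mp hi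
    rw [if_congr (pv_cond_iff text i hN hi0 hiN) rfl rfl]
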